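-- pv_equiv track=rewrite | github.com/sonkeehoon/Python | B1065.py | H_num
-- ===== SOURCE A (Python) =====
-- def H_num(N):
--     count=99
--     if N<100:
--         return N
--     for i in range(100,N+1):
--         s=str(i)
--         if i==1000:
--             return count
--         elif int(s[-1])-int(s[-2])==int(s[-2])-int(s[-3]):
--             count+=1
--     return count
-- ===== SOURCE B (Python) =====
-- def H_num(N):
--     if N < 100:
--         return N
--     M = min(N, 999)
--     count = 99
--     for a in range(1, 10):
--         for d in range(-9, 10):
--             if 0 <= a + d <= 9 and 0 <= a + 2 * d <= 9:
--                 num = 100 * a + 10 * (a + d) + (a + 2 * d)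
--                 if num <= M:
--                     count += 1
--     return count
-- ===== Notes on version B (the rewrite author's own statement) =====
-- stated objective: alternative
-- what changed: Instead of scanning every integer in the range and string-testing its digits (with an early return at 1000), B generates the three-digit arithmetic-progression numbers from (first digit, common difference) pairs and counts those at most min(N, 999).
import Mathlib
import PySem

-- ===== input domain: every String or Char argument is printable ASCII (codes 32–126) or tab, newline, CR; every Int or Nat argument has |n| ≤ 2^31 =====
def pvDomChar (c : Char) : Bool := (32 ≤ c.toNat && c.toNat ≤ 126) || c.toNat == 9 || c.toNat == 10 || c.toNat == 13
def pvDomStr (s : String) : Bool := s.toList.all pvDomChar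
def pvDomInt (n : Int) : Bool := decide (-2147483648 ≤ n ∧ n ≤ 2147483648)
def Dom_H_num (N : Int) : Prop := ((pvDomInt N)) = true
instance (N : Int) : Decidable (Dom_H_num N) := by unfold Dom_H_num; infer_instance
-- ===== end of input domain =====

-- B counts the three-digit arithmetic-progression numbers by generating them from (first digit,
-- common difference) pairs instead of scanning and string-testing every integer (objective: alternative).

-- ===== PORT A =====
-- int(s[j]) for a single character of s (exact where Python's loop reaches it: the index
-- is in range and the character is a decimal digit, so the defaults are never used)
def aDigit (s : String) (j : Int) : Int :=
  (PySem.Int.ofStr? (String.singleton ((PySem.Str.pyGet? s j).getD ' '))).getD 0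

-- the for-loop of A, with its early return at i == 1000
def aLoop : List Int → Int → Int
  | [], count => count
  | i :: rest, count =>
    let s := PySem.Int.toStr i
    if i = 1000 then count
    else if aDigit s (-1) - aDigit s (-2) = aDigit s (-2) - aDigit s (-3) then
      aLoop rest (count + 1)
    else aLoop rest count

def H_num (N : Int) : Int :=
  if N < 100 then N else aLoop (PySem.List.pyRange 100 (N + 1) 1) 99

-- ===== PORT B =====
def H_num_alt (N : Int) : Int :=
  if N < 100 then N
  else
    let M := min N 999
    (PySem.List.pyRange 1 10 1).foldl (fun count a =>
      (PySem.List.pyRange (-9) 10 1).foldl (fun count d =>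
        if 0 ≤ a + d ∧ a + d ≤ 9 ∧ 0 ≤ a + 2 * d ∧ a + 2 * d ≤ 9 then
          if 100 * a + 10 * (a + d) + (a + 2 * d) ≤ M then count + 1 else count
        else count) count) 99

-- ===== PRECONDITION & SPEC =====
def Spec_H_num (N : Int) (out : Int) : Prop := out = H_num_alt N
instance (N : Int) (out : Int) : Decidable (Spec_H_num N out) := by unfold Spec_H_num; infer_instance

-- ===== CLAIM (what is proved, stated in full; the proofs are below) =====
def Claim_equal_H_num : Prop := ∀ (N : Int), Dom_H_num N → Spec_H_num N (H_num N)

-- ===== LEMMAS AND PROOFS =====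

-- A's per-number test as a Bool predicate (unfolds to exactly the condition in aLoop)
def condA (m : Int) : Bool :=
  let s := PySem.Int.toStr m
  decide (aDigit s (-1) - aDigit s (-2) = aDigit s (-2) - aDigit s (-3))

def pairList : List (Int × Int) :=
  (PySem.List.pyRange 1 10 1).flatMap (fun a => (PySem.List.pyRange (-9) 10 1).map (fun d => (a, d)))

def okp (p : Int × Int) : Bool :=
  decide (0 ≤ p.1 + p.2 ∧ p.1 + p.2 ≤ 9 ∧ 0 ≤ p.1 + 2 * p.2 ∧ p.1 + 2 * p.2 ≤ 9)

def numOf (p : Int × Int) : Int := 100 * p.1 + 10 * (p.1 + p.2) + (p.1 + 2 * p.2)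

def arithList : List Int := (pairList.filter okp).map numOf

-- A's loop without early exit counts condA
theorem aLoop_noexit : ∀ (l : List Int) (c : Int), (1000 : Int) ∉ l →
    aLoop l c = c + (l.countP condA : Int) := by
  intro l
  induction l with
  | nil => intro c _; simp [aLoop]
  | cons i rest ih =>
    intro c h
    have hi : i ≠ 1000 := fun he => h (he ▸ List.mem_cons_self)
    have hr : (1000 : Int) ∉ rest := fun hm => h (List.mem_cons_of_mem _ hm)
    by_cases hc : aDigit (PySem.Int.toStr i) (-1) - aDigit (PySem.Int.toStr i) (-2)
        = aDigit (PySem.Int.toStr i) (-2) - aDigit (PySem.Int.toStr i) (-3)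
    · simp only [aLoop, if_neg hi, ih _ hr, List.countP_cons, condA, hc]
      simp; omega
    · simp only [aLoop, if_neg hi, ih _ hr, List.countP_cons, condA, hc]
      simp

-- A's loop returns at the first 1000, ignoring everything after it
theorem aLoop_exit : ∀ (l l' : List Int) (c : Int), (1000 : Int) ∉ l →
    aLoop (l ++ 1000 :: l') c = c + (l.countP condA : Int) := by
  intro l
  induction l with
  | nil => intro l' c _; simp [aLoop]
  | cons i rest ih =>
    intro l' c h
    have hi : i ≠ 1000 := fun he => h (he ▸ List.mem_cons_self)
    have hr : (1000 : Int) ∉ rest := fun hm => h (List.mem_cons_of_mem _ hm)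
    by_cases hc : aDigit (PySem.Int.toStr i) (-1) - aDigit (PySem.Int.toStr i) (-2)
        = aDigit (PySem.Int.toStr i) (-2) - aDigit (PySem.Int.toStr i) (-3)
    · simp only [List.cons_append, aLoop, if_neg hi, ih _ _ hr, List.countP_cons, condA, hc]
      simp; omega
    · simp only [List.cons_append, aLoop, if_neg hi, ih _ _ hr, List.countP_cons, condA, hc]
      simp

-- B's inner fold counts the qualifying (a,d) pairs for one a
theorem b_inner (M a : Int) : ∀ (l : List Int) (c : Int),
    l.foldl (fun count d =>
        if 0 ≤ a + d ∧ a + d ≤ 9 ∧ 0 ≤ a + 2 * d ∧ a + 2 * d ≤ 9 then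
          if 100 * a + 10 * (a + d) + (a + 2 * d) ≤ M then count + 1 else count
        else count) c
    = c + ((l.map (fun d => (a, d))).countP (fun p => okp p && decide (numOf p ≤ M)) : Int) := by
  intro l
  induction l with
  | nil => intro c; simp
  | cons d rest ih =>
    intro c
    simp only [List.foldl_cons, List.map_cons, List.countP_cons]
    by_cases h1 : 0 ≤ a + d ∧ a + d ≤ 9 ∧ 0 ≤ a + 2 * d ∧ a + 2 * d ≤ 9
    · by_cases h2 : 100 * a + 10 * (a + d) + (a + 2 * d) ≤ M
      · simp [h1, h2, ih, okp, numOf]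
        push_cast
        omega
      · simp [h1, h2, ih, okp, numOf]
    · simp [h1, ih, okp, numOf]

-- B's nested folds count the qualifying pairs of pairList
theorem b_outer (M : Int) : ∀ (la : List Int) (c : Int),
    la.foldl (fun count a =>
      (PySem.List.pyRange (-9) 10 1).foldl (fun count d =>
        if 0 ≤ a + d ∧ a + d ≤ 9 ∧ 0 ≤ a + 2 * d ∧ a + 2 * d ≤ 9 then
          if 100 * a + 10 * (a + d) + (a + 2 * d) ≤ M then count + 1 else count
        else count) count) c
    = c + ((la.flatMap (fun a => (PySem.List.pyRange (-9) 10 1).map (fun d => (a, d)))).countP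
        (fun p => okp p && decide (numOf p ≤ M)) : Int) := by
  intro la
  induction la with
  | nil => intro c; simp
  | cons a rest ih =>
    intro c
    rw [List.foldl_cons, b_inner M a, ih]
    rw [List.flatMap_cons, List.countP_append]
    push_cast
    ring

-- counting through filter-and-map
theorem cntP_map_filter (q : Int → Bool) : ∀ (l : List (Int × Int)),
    ((l.filter okp).map numOf).countP q = l.countP (fun p => okp p && q (numOf p)) := by
  intro l
  induction l with
  | nil => rfl
  | cons p rest ih =>
    by_cases h : okp p
    · simp [List.countP_cons, h, ih]
    · simp [h, ih]

-- B's value for N ≥ 100 in closed counting form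
theorem b_char (N : Int) (h : ¬ N < 100) :
    H_num_alt N = 99 + (arithList.countP (fun x => decide (x ≤ min N 999)) : Int) := by
  simp only [H_num_alt, if_neg h]
  rw [b_outer]
  simp only [arithList, cntP_map_filter, pairList]

-- counting ≤ M+1 splits into ≤ M and = M+1
theorem cnt_le_succ (M : Int) : ∀ (L : List Int),
    (L.countP (fun x => decide (x ≤ M + 1)) : Int)
    = (L.countP (fun x => decide (x ≤ M)) : Int) + (L.countP (fun x => x == M + 1) : Int) := by
  intro L
  induction L with
  | nil => simp
  | cons x rest ih =>
    by_cases h1 : x ≤ M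
    · have h3 : x ≤ M + 1 := by omega
      have h4 : ¬ x = M + 1 := by omega
      simp [h1, h3, h4, ih]
      push_cast
      omega
    · by_cases h2 : x = M + 1
      · have h3 : x ≤ M + 1 := by omega
        simp [h2, ih]
        omega
      · have h3 : ¬ x ≤ M + 1 := by omega
        simp [h1, h2, h3, ih]

-- the pointwise fact: A's digit test at m agrees with how often m is generated
set_option maxRecDepth 100000 in
set_option maxHeartbeats 4000000 in
theorem pointwise : ∀ k : Fin 900,
    (if condA (100 + (k : Nat)) then (1 : Int) else 0)
    = (arithList.countP (fun x => x == (100 + (k : Nat) : Int)) : Int) := by decide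

-- the central counting identity, by induction up the range
theorem key : ∀ (k : Nat), k ≤ 900 →
    ((PySem.List.pyRange 100 (100 + (k : Int)) 1).countP condA : Int)
    = (arithList.countP (fun x => decide (x ≤ 99 + (k : Int))) : Int) := by
  intro k
  induction k with
  | zero =>
    intro _
    norm_num [PySem.List.pyRange_one_eq_nil]
  | succ n ih =>
    intro h
    have hsplit : PySem.List.pyRange 100 (100 + ((n : Int) + 1)) 1
        = PySem.List.pyRange 100 (100 + (n : Int)) 1 ++ [100 + (n : Int)] := by
      rw [show (100 : Int) + ((n : Int) + 1) = (100 + (n : Int)) + 1 from by ring]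
      exact PySem.List.pyRange_one_succ_right (by omega)
    have hpt := pointwise ⟨n, by omega⟩
    push_cast at hpt ⊢
    rw [hsplit, List.countP_append]
    push_cast
    rw [ih (by omega)]
    rw [show (99 : Int) + ((n : Int) + 1) = (99 + (n : Int)) + 1 from by ring,
      cnt_le_succ (99 + (n : Int))]
    simp only [show (99 + (n : Int)) + 1 = 100 + (n : Int) from by ring]
    have hone : ((List.countP condA [100 + (n : Int)] : Nat) : Int)
        = if condA (100 + (n : Int)) then (1 : Int) else 0 := by
      simp only [List.countP_cons, List.countP_nil]
      split_ifs with hc <;> simp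
    rw [hone, hpt]

-- ===== VERDICT (by name: the statement is the Claim_ definition above) =====
theorem H_num_spec : Claim_equal_H_num := by
  intro N _
  unfold Spec_H_num
  by_cases hlt : N < 100
  · simp [H_num, H_num_alt, hlt]
  · by_cases hbig : N ≤ 999
    · -- 100 ≤ N ≤ 999 : no early exit, the counting identity applies directly
      have hmem : (1000 : Int) ∉ PySem.List.pyRange 100 (N + 1) 1 := by
        rw [PySem.List.mem_pyRange_one]; omega
      have hk : ∃ k : Nat, k ≤ 900 ∧ N + 1 = 100 + (k : Int) := by
        refine ⟨(N - 99).toNat, by omega, by omega⟩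
      obtain ⟨k, hk900, hkN⟩ := hk
      have hmin : min N 999 = N := by omega
      rw [H_num, if_neg hlt, aLoop_noexit _ _ hmem, b_char N hlt, hkN, key k hk900, hmin]
      have : 99 + (k : Int) = N := by omega
      rw [this]
    · -- N ≥ 1000 : A exits early at 1000; both sides count everything ≤ 999
      have hsplit : PySem.List.pyRange 100 (N + 1) 1
          = PySem.List.pyRange 100 1000 1 ++ PySem.List.pyRange 1000 (N + 1) 1 :=
        PySem.List.pyRange_one_append 100 1000 (N + 1) (by omega) (by omega)
      have hcons : PySem.List.pyRange 1000 (N + 1) 1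
          = 1000 :: PySem.List.pyRange 1001 (N + 1) 1 := by
        have := PySem.List.pyRange_one_cons (a := 1000) (b := N + 1) (by omega)
        simpa using this
      have hmem : (1000 : Int) ∉ PySem.List.pyRange 100 1000 1 := by
        rw [PySem.List.mem_pyRange_one]; omega
      have hmin : min N 999 = 999 := by omega
      rw [H_num, if_neg hlt, hsplit, hcons, aLoop_exit _ _ _ hmem, b_char N hlt, hmin]
      have hkey := key 900 (le_refl _)
      rw [show ((100 : Int) + ((900 : Nat) : Int)) = 1000 from by norm_num,
        show ((99 : Int) + ((900 : Nat) : Int)) = 999 from by norm_num] at hkey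
      rw [hkey]
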